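-- pv_equiv track=rewrite | github.com/NBMueller/SCcaller | sccaller_v2.0.0_NB.py | get_reference_variant_allele_num
-- ===== SOURCE A (Python) =====
-- def get_reference_variant_allele_num(read_bases):
--     v_num = 0
--     r_num = 0
--     for i, base in enumerate(read_bases):
--         if base in [".", ","]:
--             r_num += 1
--         if base in ["A", "T", "C", "G"]:
--             v_num += 1
--         if i > 0 and base in ["I", "i"] and read_bases[i - 1] in [".", ","]:
--             r_num -= 1
--             v_num += 1
--     return r_num, v_num
-- ===== SOURCE B (Python) =====
-- def get_reference_variant_allele_num(read_bases):
--     adj = sum(1 for p, b in zip(read_bases, read_bases[1:])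
--               if b in ("I", "i") and p in (".", ","))
--     r_num = read_bases.count(".") + read_bases.count(",") - adj
--     v_num = (read_bases.count("A") + read_bases.count("T")
--              + read_bases.count("C") + read_bases.count("G") + adj)
--     return r_num, v_num
-- ===== Notes on version B (the rewrite author's own statement) =====
-- stated objective: idiomatic
-- what changed: Replaces the indexed accumulator loop with previous-element lookups by list.count calls plus one zip-with-successor count of '.'/',' followed by 'I'/'i' markers.
import Mathlib
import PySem

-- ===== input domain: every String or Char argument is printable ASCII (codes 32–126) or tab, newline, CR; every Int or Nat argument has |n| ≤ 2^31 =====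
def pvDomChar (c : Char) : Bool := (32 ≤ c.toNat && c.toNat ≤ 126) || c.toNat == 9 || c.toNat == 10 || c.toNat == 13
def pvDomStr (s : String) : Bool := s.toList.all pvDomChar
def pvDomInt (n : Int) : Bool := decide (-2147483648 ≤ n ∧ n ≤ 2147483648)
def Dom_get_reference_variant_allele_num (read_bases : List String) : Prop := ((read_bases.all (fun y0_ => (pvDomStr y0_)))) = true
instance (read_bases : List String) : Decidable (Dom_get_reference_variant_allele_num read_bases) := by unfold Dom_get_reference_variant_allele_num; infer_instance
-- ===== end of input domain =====

-- B replaces A's indexed accumulator loop (with read_bases[i-1] lookups) by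
-- list.count calls plus one zip-with-successor count of '.'/',' followed by 'I'/'i'.

-- ===== PORT A =====
-- loop body of A's 'for i, base in enumerate(read_bases)', state (v_num, r_num)
def pvBodyA (read_bases : List String) (st : Int × Int) (ib : Int × String) : Int × Int :=
  let v_num := st.1
  let r_num := st.2
  let i := ib.1
  let base := ib.2
  let r_num := if base == "." || base == "," then r_num + 1 else r_num
  let v_num := if base == "A" || base == "T" || base == "C" || base == "G" then v_num + 1 else v_num
  if decide (i > 0) && (base == "I" || base == "i") &&
     (match PySem.List.pyGet? read_bases (i - 1) with
      | some p => p == "." || p == ","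
      | none => false)
  then (v_num + 1, r_num - 1)
  else (v_num, r_num)

def get_reference_variant_allele_num (read_bases : List String) : Int × Int :=
  let st := (PySem.List.enumerate read_bases 0).foldl (pvBodyA read_bases) (0, 0)
  (st.2, st.1)

-- ===== PORT B =====
def get_reference_variant_allele_num_alt (read_bases : List String) : Int × Int :=
  let adj : Int :=
    ((read_bases.zip (PySem.List.slice read_bases (some 1) none)).countP
      (fun pb => (pb.2 == "I" || pb.2 == "i") && (pb.1 == "." || pb.1 == ",")) : Nat)
  let r_num : Int := (read_bases.count "." : Int) + (read_bases.count "," : Int) - adj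
  let v_num : Int := (read_bases.count "A" : Int) + (read_bases.count "T" : Int)
    + (read_bases.count "C" : Int) + (read_bases.count "G" : Int) + adj
  (r_num, v_num)

-- ===== PRECONDITION & SPEC =====
def Spec_get_reference_variant_allele_num (read_bases : List String) (out : Int × Int) : Prop := out = get_reference_variant_allele_num_alt read_bases
instance (read_bases : List String) (out : Int × Int) : Decidable (Spec_get_reference_variant_allele_num read_bases out) := by unfold Spec_get_reference_variant_allele_num; infer_instance

-- ===== CLAIM (what is proved, stated in full; the proofs are below) =====
def Claim_equal_get_reference_variant_allele_num : Prop := ∀ (read_bases : List String), Dom_get_reference_variant_allele_num read_bases → Spec_get_reference_variant_allele_num read_bases (get_reference_variant_allele_num read_bases)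

-- ===== LEMMAS AND PROOFS =====

def pvIsRef (s : String) : Bool := s == "." || s == ","
def pvIsVar (s : String) : Bool := s == "A" || s == "T" || s == "C" || s == "G"
def pvIsIns (s : String) : Bool := s == "I" || s == "i"
def pvPrevRef : Option String → Bool
  | some p => pvIsRef p
  | none => false

def pvRefC : List String → Int
  | [] => 0
  | b :: t => (if pvIsRef b then 1 else 0) + pvRefC t
def pvVarC : List String → Int
  | [] => 0
  | b :: t => (if pvIsVar b then 1 else 0) + pvVarC t
def pvAdjC : Option String → List String → Int
  | _, [] => 0
  | prev, b :: t => (if pvIsIns b && pvPrevRef prev then 1 else 0) + pvAdjC (some b) t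

def pvZC (l : List String) : Int :=
  ((l.zip l.tail).countP (fun pb => (pb.2 == "I" || pb.2 == "i") && (pb.1 == "." || pb.1 == ",")) : Nat)

lemma pvBodyA_eq (rb pre : List String) (b : String) (t : List String)
    (h : rb = pre ++ b :: t) (v r : Int) :
    pvBodyA rb (v, r) ((pre.length : Int), b)
    = ((if pvIsVar b then v + 1 else v) + (if pvIsIns b && pvPrevRef pre.getLast? then 1 else 0),
       (if pvIsRef b then r + 1 else r) - (if pvIsIns b && pvPrevRef pre.getLast? then 1 else 0)) := by
  have hcond : (decide ((pre.length : Int) > 0) && (b == "I" || b == "i") &&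
      (match PySem.List.pyGet? rb ((pre.length : Int) - 1) with
        | some p => p == "." || p == ","
        | none => false)) = (pvIsIns b && pvPrevRef pre.getLast?) := by
    cases pre with
    | nil => simp [pvPrevRef, pvIsIns]
    | cons p0 pre' =>
      have hlen : (0 : Int) < ((p0 :: pre').length : Int) := by exact_mod_cast Nat.succ_pos pre'.length
      have hidx : (((p0 :: pre').length : Int) - 1) = (((p0 :: pre').length - 1 : Nat) : Int) := by
        simp [List.length_cons]
      have hget : PySem.List.pyGet? rb (((p0 :: pre').length : Int) - 1)
          = some ((p0 :: pre').getLast (by simp)) := by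
        rw [hidx, PySem.List.pyGet?_natCast, h]
        rw [List.getElem?_append_left (by simp [List.length_cons])]
        rw [List.getElem?_eq_getElem (by simp [List.length_cons])]
        simp [List.getLast_eq_getElem]
      rw [hget, List.getLast?_eq_getLast_of_ne_nil (by simp)]
      simp [pvPrevRef, pvIsRef, pvIsIns, hlen, Bool.and_comm]
  unfold pvBodyA
  simp only [hcond, pvIsRef, pvIsVar]
  cases hb : (pvIsIns b && pvPrevRef pre.getLast?) <;> split_ifs <;> simp_all <;> omega

lemma pvLoopA (rb : List String) : ∀ (t pre : List String) (v r : Int), rb = pre ++ t →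
    (PySem.List.enumerate t (pre.length : Int)).foldl (pvBodyA rb) (v, r)
    = (v + pvVarC t + pvAdjC pre.getLast? t, r + pvRefC t - pvAdjC pre.getLast? t) := by
  intro t
  induction t with
  | nil => intro pre v r h; simp [pvVarC, pvRefC, pvAdjC, PySem.List.enumerate]
  | cons b t ih =>
    intro pre v r h
    rw [PySem.List.enumerate_cons, List.foldl_cons, pvBodyA_eq rb pre b t h]
    have hpre : rb = (pre ++ [b]) ++ t := by simpa using h
    have ih' := ih (pre ++ [b])
      ((if pvIsVar b then v + 1 else v) + (if pvIsIns b && pvPrevRef pre.getLast? then 1 else 0))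
      ((if pvIsRef b then r + 1 else r) - (if pvIsIns b && pvPrevRef pre.getLast? then 1 else 0))
      hpre
    have hlen' : (((pre ++ [b]).length : Nat) : Int) = (pre.length : Int) + 1 := by
      simp
    have hlast : (pre ++ [b]).getLast? = some b := by simp
    rw [hlen', hlast] at ih'
    rw [ih']
    simp only [pvVarC, pvRefC, pvAdjC]
    cases hb : (pvIsIns b && pvPrevRef pre.getLast?) <;> split_ifs <;>
      simp_all [Prod.ext_iff] <;> omega

lemma pvRefC_eq (t : List String) : pvRefC t = (t.count "." : Int) + (t.count "," : Int) := by
  induction t with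
  | nil => simp [pvRefC]
  | cons b t ih =>
    simp only [pvRefC, List.count_cons, ih, pvIsRef]
    by_cases h1 : b = "." <;> by_cases h2 : b = "," <;> simp_all <;> push_cast <;> ring

lemma pvVarC_eq (t : List String) : pvVarC t = (t.count "A" : Int) + (t.count "T" : Int)
    + (t.count "C" : Int) + (t.count "G" : Int) := by
  induction t with
  | nil => simp [pvVarC]
  | cons b t ih =>
    simp only [pvVarC, List.count_cons, ih, pvIsVar]
    by_cases h1 : b = "A" <;> by_cases h2 : b = "T" <;> by_cases h3 : b = "C" <;>
      by_cases h4 : b = "G" <;> simp_all <;> push_cast <;> ring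

lemma pvAdjC_some (t : List String) : ∀ b, pvAdjC (some b) t = pvZC (b :: t) := by
  induction t with
  | nil => intro b; simp [pvAdjC, pvZC]
  | cons c t ih =>
    intro b
    simp only [pvAdjC, pvZC, List.tail_cons, List.zip_cons_cons, List.countP_cons, ih c, pvZC,
      pvIsIns, pvPrevRef, pvIsRef]
    by_cases h : ((c == "I" || c == "i") && (b == "." || b == ",")) = true <;> simp_all <;>
      push_cast <;> ring

lemma pvAdjC_none (t : List String) : pvAdjC none t = pvZC t := by
  cases t with
  | nil => simp [pvAdjC, pvZC]
  | cons b t => simp [pvAdjC, pvPrevRef, pvAdjC_some t b]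

-- ===== VERDICT (by name: the statement is the Claim_ definition above) =====
theorem get_reference_variant_allele_num_spec : Claim_equal_get_reference_variant_allele_num := by
  intro rb _
  unfold Spec_get_reference_variant_allele_num
  unfold get_reference_variant_allele_num get_reference_variant_allele_num_alt
  have h := pvLoopA rb rb [] 0 0 (by simp)
  simp only [List.length_nil, Nat.cast_zero] at h
  rw [h]
  simp only [List.getLast?_nil, pvAdjC_none, pvRefC_eq, pvVarC_eq, PySem.List.slice_from_one, pvZC]
  rw [Prod.mk.injEq]
  constructor <;> ring
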